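-- pv_equiv track=rewrite | github.com/xueww/ConoDL | ConoGen/models/conotoxin_analysis.py | analyze_toxin_sequence
-- ===== SOURCE A (Python) =====
-- def analyze_toxin_sequence(sequence):
--     scaffold = ""
--     current_scaffold = ""
--     for char in sequence:
--         if char == "C":
--             current_scaffold += "C"
--         else:
--             if current_scaffold:
--                 scaffold += current_scaffold.replace("-", "") + "-"
--                 current_scaffold = ""
--     if current_scaffold:
--         scaffold += current_scaffold.replace("-", "")
--     scaffold = scaffold.strip("-")
--     return scaffold
-- ===== SOURCE B (Python) =====
-- import re
--
-- def analyze_toxin_sequence(sequence):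
--     return "-".join(re.findall(r"C+", sequence))
-- ===== Notes on version B (the rewrite author's own statement) =====
-- stated objective: idiomatic
-- what changed: Replaces the per-character state machine (accumulate the current cysteine run, flush with a dash separator on each other residue, final strip) by extracting all maximal cysteine runs up front with a regex findall and dash-joining them.
import Mathlib
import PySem

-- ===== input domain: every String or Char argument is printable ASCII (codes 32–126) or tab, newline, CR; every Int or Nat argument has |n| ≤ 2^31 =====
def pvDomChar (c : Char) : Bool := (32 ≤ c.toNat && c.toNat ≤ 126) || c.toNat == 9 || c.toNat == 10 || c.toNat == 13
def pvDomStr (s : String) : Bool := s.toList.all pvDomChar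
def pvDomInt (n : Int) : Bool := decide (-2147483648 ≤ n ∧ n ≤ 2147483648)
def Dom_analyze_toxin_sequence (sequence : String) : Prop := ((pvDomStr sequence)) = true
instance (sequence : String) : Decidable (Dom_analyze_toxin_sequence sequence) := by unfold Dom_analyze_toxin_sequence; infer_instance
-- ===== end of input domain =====

-- B replaces A's per-character run-accumulator state machine by up-front regex extraction of
-- all maximal cysteine runs followed by a single dash-join: idiomatic, same cost.


-- ===== PORT A =====
-- the for-loop over the characters, state = (scaffold, current_scaffold)
def pvALoop : List Char → List Char → List Char → List Char × List Char
  | [], scaffold, cur => (scaffold, cur)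
  | ch :: rest, scaffold, cur =>
    if ch = 'C' then pvALoop rest scaffold (cur ++ ['C'])
    else if cur ≠ [] then
      pvALoop rest (scaffold ++ PySem.Chars.replace cur ['-'] [] ++ ['-']) []
    else pvALoop rest scaffold cur

def analyze_toxin_sequence (sequence : String) : String :=
  let p := pvALoop sequence.toList [] []
  let scaffold := if p.2 ≠ [] then p.1 ++ PySem.Chars.replace p.2 ['-'] [] else p.1
  String.mk (PySem.Chars.stripChars scaffold ['-'])

-- ===== PORT B =====
-- re.findall(r"C+", s): the maximal runs of 'C', left to right
def pvFindCRuns : List Char → List (List Char)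
  | [] => []
  | ch :: rest =>
    if ch = 'C' then ('C' :: rest.takeWhile (· == 'C')) :: pvFindCRuns (rest.dropWhile (· == 'C'))
    else pvFindCRuns rest
termination_by cs => cs.length
decreasing_by
  · exact Nat.lt_succ_of_le (List.length_dropWhile_le _ _)
  · simp

def analyze_toxin_sequence_alt (sequence : String) : String :=
  String.mk (PySem.Chars.join ['-'] (pvFindCRuns sequence.toList))

-- ===== PRECONDITION & SPEC =====
def Spec_analyze_toxin_sequence (sequence : String) (out : String) : Prop := out = analyze_toxin_sequence_alt sequence
instance (sequence : String) (out : String) : Decidable (Spec_analyze_toxin_sequence sequence out) := by unfold Spec_analyze_toxin_sequence; infer_instance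

-- ===== CLAIM (what is proved, stated in full; the proofs are below) =====
def Claim_equal_analyze_toxin_sequence : Prop := ∀ (sequence : String), Dom_analyze_toxin_sequence sequence → Spec_analyze_toxin_sequence sequence (analyze_toxin_sequence sequence)

-- ===== LEMMAS AND PROOFS =====

-- after the loop: append the pending run (A calls .replace on it)
def pvAfter (p : List Char × List Char) : List Char :=
  if p.2 ≠ [] then p.1 ++ PySem.Chars.replace p.2 ['-'] [] else p.1

-- the trailing dash A's scaffold carries before the final strip("-")
def pvE (cs : List Char) (k : Nat) : List Char :=
  if (k ≠ 0 ∨ 'C' ∈ cs) ∧ cs ≠ [] ∧ cs.getLast? ≠ some 'C' then ['-'] else []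

theorem pvReplaceGo_no_dash (fuel : Nat) (l acc : List Char) (h : '-' ∉ l) :
    PySem.Chars.replace.go ['-'] [] fuel l acc = acc.reverse ++ l := by
  induction fuel generalizing l acc with
  | zero => simp [PySem.Chars.replace.go]
  | succ n ih =>
    cases l with
    | nil => simp [PySem.Chars.replace.go]
    | cons c t =>
      have hc : c ≠ '-' := by simp at h; tauto
      have ht : '-' ∉ t := by simp at h; tauto
      simp only [PySem.Chars.replace.go]
      rw [if_neg (by simp [List.isPrefixOf]; exact fun e => absurd e.symm hc), ih t (c :: acc) ht]
      simp

theorem pvReplace_rep (k : Nat) :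
    PySem.Chars.replace (List.replicate k 'C') ['-'] [] = List.replicate k 'C' := by
  rw [PySem.Chars.replace]
  simp only [List.isEmpty_cons]
  rw [pvReplaceGo_no_dash]
  · simp
  · simp

theorem pvTakeWhile_rep (k : Nat) (x : Char) (cs : List Char) (hx : x ≠ 'C') :
    (List.replicate k 'C' ++ x :: cs).takeWhile (· == 'C') = List.replicate k 'C' := by
  induction k with
  | zero => simp [hx]
  | succ n ih => simp [List.replicate_succ, ih]

theorem pvDropWhile_rep (k : Nat) (x : Char) (cs : List Char) (hx : x ≠ 'C') :
    (List.replicate k 'C' ++ x :: cs).dropWhile (· == 'C') = x :: cs := by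
  induction k with
  | zero => simp [hx]
  | succ n ih => simp [List.replicate_succ, ih]

theorem pvRuns_rep_pos (k : Nat) :
    pvFindCRuns (List.replicate (k + 1) 'C') = [List.replicate (k + 1) 'C'] := by
  rw [List.replicate_succ, pvFindCRuns]
  simp [pvFindCRuns]

theorem pvRuns_skip (x : Char) (cs : List Char) (hx : x ≠ 'C') :
    pvFindCRuns (x :: cs) = pvFindCRuns cs := by
  rw [pvFindCRuns, if_neg hx]

theorem pvRuns_flush (k : Nat) (x : Char) (cs : List Char) (hx : x ≠ 'C') :
    pvFindCRuns (List.replicate (k + 1) 'C' ++ x :: cs) =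
      List.replicate (k + 1) 'C' :: pvFindCRuns cs := by
  rw [List.replicate_succ, List.cons_append, pvFindCRuns]
  simp [pvTakeWhile_rep k x cs hx, pvDropWhile_rep k x cs hx, pvRuns_skip x cs hx]

theorem pvRuns_nil_iff (cs : List Char) : pvFindCRuns cs = [] ↔ 'C' ∉ cs := by
  induction cs using pvFindCRuns.induct with
  | case1 => simp [pvFindCRuns]
  | case2 rest ih =>
    rw [pvFindCRuns]
    simp
  | case3 ch rest h ih =>
    rw [pvRuns_skip ch rest h]
    simp [ih, Ne.symm h]

theorem pvRuns_shape (cs : List Char) :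
    ∀ r ∈ pvFindCRuns cs, ∃ m, r = List.replicate (m + 1) 'C' := by
  induction cs using pvFindCRuns.induct with
  | case1 => simp [pvFindCRuns]
  | case2 rest ih =>
    rw [pvFindCRuns, if_pos rfl]
    intro r hmem
    rcases List.mem_cons.mp hmem with h | hr
    · subst h
      refine ⟨(rest.takeWhile (· == 'C')).length, ?_⟩
      rw [List.replicate_succ]
      congr 1
      apply List.eq_replicate_of_mem
      intro b hb
      simpa using List.mem_takeWhile_imp hb
    · exact ih r hr
  | case3 ch rest h ih =>
    rw [pvRuns_skip ch rest h]
    exact ih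

-- join of a cons, with the separator made explicit
theorem pvJoin_cons (a : List Char) (rs : List (List Char)) :
    PySem.Chars.join ['-'] (a :: rs) =
      a ++ (if rs = [] then [] else '-' :: PySem.Chars.join ['-'] rs) := by
  cases rs with
  | nil => simp [PySem.Chars.join, List.intercalate]
  | cons b l => simp [PySem.Chars.join, List.intercalate, List.intersperse]

theorem pvJoin_getLast (rs : List (List Char))
    (hsh : ∀ r ∈ rs, ∃ m, r = List.replicate (m + 1) 'C') (hne : rs ≠ []) :
    (PySem.Chars.join ['-'] rs).getLast? = some 'C' := by
  induction rs with
  | nil => exact absurd rfl hne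
  | cons a l ih =>
    rw [pvJoin_cons]
    cases l with
    | nil =>
      obtain ⟨m, rfl⟩ := hsh a (by simp)
      simp [List.getLast?_replicate]
    | cons b t =>
      have hlast' : (PySem.Chars.join ['-'] (b :: t)).getLast? = some 'C' :=
        ih (fun r hr => hsh r (by simp [hr])) (by simp)
      rw [if_neg (by simp), List.getLast?_append,
        show ('-' :: PySem.Chars.join ['-'] (b :: t)) = ['-'] ++ PySem.Chars.join ['-'] (b :: t) from rfl,
        List.getLast?_append, hlast']
      simp

theorem pvJoin_head (rs : List (List Char))
    (hsh : ∀ r ∈ rs, ∃ m, r = List.replicate (m + 1) 'C') (hne : rs ≠ []) :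
    ∃ t, PySem.Chars.join ['-'] rs = 'C' :: t := by
  cases rs with
  | nil => exact absurd rfl hne
  | cons a l =>
    obtain ⟨m, rfl⟩ := hsh a (by simp)
    rw [pvJoin_cons, List.replicate_succ, List.cons_append]
    exact ⟨_, rfl⟩

-- stripping '-' from both ends of (join runs ++ E) gives back join runs
theorem pvStrip_join (rs : List (List Char)) (E : List Char)
    (hsh : ∀ r ∈ rs, ∃ m, r = List.replicate (m + 1) 'C') (hne : rs ≠ [])
    (hE : E = [] ∨ E = ['-']) :
    PySem.Chars.stripChars (PySem.Chars.join ['-'] rs ++ E) ['-'] =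
      PySem.Chars.join ['-'] rs := by
  obtain ⟨t, ht⟩ := pvJoin_head rs hsh hne
  have hlast := pvJoin_getLast rs hsh hne
  rw [PySem.Chars.stripChars]
  have h1 : List.dropWhile (fun c => (['-'] : List Char).contains c)
      (PySem.Chars.join ['-'] rs ++ E) = PySem.Chars.join ['-'] rs ++ E := by
    rw [ht]; simp
  rw [h1]
  have h2 : List.dropWhile (fun c => (['-'] : List Char).contains c)
      ((PySem.Chars.join ['-'] rs ++ E).reverse) = (PySem.Chars.join ['-'] rs).reverse := by
    have hJ : PySem.Chars.join ['-'] rs ≠ [] := by rw [ht]; simp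
    have hrev : (PySem.Chars.join ['-'] rs).reverse = 'C' :: (PySem.Chars.join ['-'] rs).reverse.tail := by
      have : (PySem.Chars.join ['-'] rs).reverse.head? = some 'C' := by
        rw [List.head?_reverse]; exact hlast
      cases hrev : (PySem.Chars.join ['-'] rs).reverse with
      | nil => simp [hrev] at this
      | cons c cs => rw [hrev] at this; simp at this; simp [this]
    rcases hE with rfl | rfl
    · rw [List.append_nil, hrev]; simp
    · rw [List.reverse_append]
      simp only [List.reverse_singleton, List.singleton_append, List.dropWhile_cons]
      rw [hrev]
      simp
  rw [h2, List.reverse_reverse]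

-- main loop invariant: the scaffold A has built, as runs joined with '-' plus a possible trailing dash
theorem pvMain (cs : List Char) : ∀ (s : List Char) (k : Nat),
    pvAfter (pvALoop cs s (List.replicate k 'C')) =
      s ++ PySem.Chars.join ['-'] (pvFindCRuns (List.replicate k 'C' ++ cs)) ++ pvE cs k := by
  induction cs with
  | nil =>
    intro s k
    rw [pvALoop]
    cases k with
    | zero => simp [pvAfter, pvE, PySem.Chars.join, List.intercalate, pvFindCRuns]
    | succ n =>
      simp only [pvAfter, List.append_nil]
      rw [if_pos (by simp [List.replicate_succ]), pvReplace_rep, pvRuns_rep_pos,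
        pvJoin_cons]
      simp [pvE]
  | cons x rest ih =>
    intro s k
    by_cases hx : x = 'C'
    · subst hx
      rw [pvALoop, if_pos rfl]
      have hrep : List.replicate k 'C' ++ ['C'] = List.replicate (k + 1) 'C' := by
        simp [List.replicate_succ']
      rw [hrep, ih s (k + 1)]
      have harg : List.replicate (k + 1) 'C' ++ rest = List.replicate k 'C' ++ 'C' :: rest := by
        simp [List.replicate_succ']
      rw [harg]
      have hE : pvE rest (k + 1) = pvE ('C' :: rest) k := by
        unfold pvE
        cases rest with
        | nil => simp
        | cons y t => simp [List.getLast?_cons_cons]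
      rw [hE]
    · rw [pvALoop, if_neg hx]
      cases k with
      | zero =>
        rw [if_neg (by simp)]
        have h0 := ih s 0
        simp only [List.replicate_zero, List.nil_append] at h0
        rw [show (List.replicate 0 'C' : List Char) = [] from rfl, List.nil_append,
          h0, pvRuns_skip x rest hx]
        have hE : pvE rest 0 = pvE (x :: rest) 0 := by
          unfold pvE
          cases rest with
          | nil => simp [Ne.symm hx]
          | cons y t => simp [List.getLast?_cons_cons, Ne.symm hx]
        rw [hE]
      | succ n =>
        rw [if_pos (by simp [List.replicate_succ]), pvReplace_rep]
        have h0 := ih (s ++ List.replicate (n + 1) 'C' ++ ['-']) 0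
        simp only [List.replicate_zero, List.nil_append] at h0
        rw [h0, pvRuns_flush n x rest hx, pvJoin_cons]
        by_cases hr : pvFindCRuns rest = []
        · have hC : 'C' ∉ rest := (pvRuns_nil_iff rest).mp hr
          have h1 : pvE rest 0 = [] := by unfold pvE; simp [hC]
          have h2 : pvE (x :: rest) (n + 1) = ['-'] := by
            unfold pvE
            rw [if_pos]
            refine ⟨by simp, by simp, ?_⟩
            cases rest with
            | nil => simp [hx]
            | cons y t =>
              rw [List.getLast?_cons_cons]
              intro hlast
              exact hC (by
                have := List.mem_of_getLast? hlast
                simpa using this)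
          rw [hr, h1, h2]
          simp
        · have hC : 'C' ∈ rest := by
            by_contra hc
            exact hr ((pvRuns_nil_iff rest).mpr hc)
          have hrest : rest ≠ [] := by rintro rfl; exact hr (by rw [pvFindCRuns])
          have hE : pvE rest 0 = pvE (x :: rest) (n + 1) := by
            unfold pvE
            cases rest with
            | nil => exact absurd rfl hrest
            | cons y t => simp [List.getLast?_cons_cons, hC]
          rw [if_neg hr, hE]
          simp

-- ===== VERDICT (by name: the statement is the Claim_ definition above) =====
theorem analyze_toxin_sequence_spec : Claim_equal_analyze_toxin_sequence := by
  intro seq _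
  unfold Spec_analyze_toxin_sequence analyze_toxin_sequence analyze_toxin_sequence_alt
  have hA : (let p := pvALoop seq.toList [] [];
      let scaffold := if p.2 ≠ [] then p.1 ++ PySem.Chars.replace p.2 ['-'] [] else p.1;
      String.mk (PySem.Chars.stripChars scaffold ['-']))
      = String.mk (PySem.Chars.stripChars (pvAfter (pvALoop seq.toList [] [])) ['-']) := rfl
  rw [hA]
  have hmain := pvMain seq.toList [] 0
  rw [show (List.replicate 0 'C') = ([] : List Char) from rfl] at hmain
  rw [List.nil_append, List.nil_append] at hmain
  rw [hmain]
  by_cases hr : pvFindCRuns seq.toList = []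
  · have hC : 'C' ∉ seq.toList := (pvRuns_nil_iff _).mp hr
    have hE : pvE seq.toList 0 = [] := by unfold pvE; simp [hC]
    rw [hr, hE]
    simp [PySem.Chars.join, List.intercalate, PySem.Chars.stripChars]
  · have hE : pvE seq.toList 0 = [] ∨ pvE seq.toList 0 = ['-'] := by
      unfold pvE; split <;> simp
    rw [pvStrip_join _ _ (pvRuns_shape _) hr hE]
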